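-- pv_equiv track=rewrite | github.com/VPhilavong/Palette | cli/palette/cli/interactive_refiner.py | _generate_refinement_approach
-- ===== SOURCE A (Python) =====
-- def _generate_refinement_approach(request: str, category: str, complexity: str) -> str:
--     """Generate a suggested approach for the refinement."""
--
--     request_lower = request.lower()
--
--     # Style refinements
--     if category == 'style':
--         if any(word in request_lower for word in ['color', 'theme']):
--             return "Update color scheme and theme variables"
--         elif any(word in request_lower for word in ['compact', 'smaller', 'size']):
--             return "Reduce component size and spacing"
--         elif 'responsive' in request_lower:
--             return "Add responsive breakpoints and mobile-first design"
--         else: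
--             return "Apply visual style improvements"
--
--     # Functionality refinements
--     elif category == 'functionality':
--         if any(word in request_lower for word in ['click', 'button', 'action']):
--             return "Add click handlers and interactive behavior"
--         elif any(word in request_lower for word in ['loading', 'state']):
--             return "Implement loading states and state management"
--         elif 'validation' in request_lower:
--             return "Add form validation and error handling"
--         else:
--             return "Enhance component functionality"
--
--     # Structure refinements
--     elif category == 'structure':
--         if any(word in request_lower for word in ['split', 'separate']):
--             return "Break component into smaller, reusable parts"
--         elif any(word in request_lower for word in ['props', 'customizable']):
--             return "Add configurable props and options"
--         else:
--             return "Restructure component organization"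
--
--     # Content refinements
--     else:  # content
--         if 'example' in request_lower:
--             return "Update with more realistic example data"
--         elif 'placeholder' in request_lower:
--             return "Improve placeholder content and messaging"
--         else:
--             return "Update component content and text"
-- ===== SOURCE B (Python) =====
-- KEYWORD_GROUPS = {
--     'style': [['color', 'theme'], ['compact', 'smaller', 'size'], ['responsive']],
--     'functionality': [['click', 'button', 'action'], ['loading', 'state'], ['validation']],
--     'structure': [['split', 'separate'], ['props', 'customizable']],
--     'content': [['example'], ['placeholder']],
-- }
-- MESSAGES = {
--     ('style', 0): "Update color scheme and theme variables",
--     ('style', 1): "Reduce component size and spacing",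
--     ('style', 2): "Add responsive breakpoints and mobile-first design",
--     ('style', 3): "Apply visual style improvements",
--     ('functionality', 0): "Add click handlers and interactive behavior",
--     ('functionality', 1): "Implement loading states and state management",
--     ('functionality', 2): "Add form validation and error handling",
--     ('functionality', 3): "Enhance component functionality",
--     ('structure', 0): "Break component into smaller, reusable parts",
--     ('structure', 1): "Add configurable props and options",
--     ('structure', 2): "Restructure component organization",
--     ('content', 0): "Update with more realistic example data",
--     ('content', 1): "Improve placeholder content and messaging",
--     ('content', 2): "Update component content and text",
-- }
-- ALL_KEYWORDS = [w for groups in KEYWORD_GROUPS.values() for g in groups for w in g]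
--
--
-- def _generate_refinement_approach(request: str, category: str, complexity: str) -> str:
--     """Generate a suggested approach for the refinement."""
--     request_lower = request.lower()
--     # stage 1: category-independent feature extraction — which keywords occur at all
--     hits = {w for w in ALL_KEYWORDS if w in request_lower}
--     # stage 2: resolve category (unknown -> 'content') and priority of the hit set
--     cat = category if category in KEYWORD_GROUPS else 'content'
--     groups = KEYWORD_GROUPS[cat]
--     idx = next((i for i, g in enumerate(groups) if hits.intersection(g)), len(groups))
--     return MESSAGES[cat, idx]
-- ===== Notes on version B (the rewrite author's own statement) =====
-- stated objective: alternative
-- what changed: B is a two-stage pipeline: first a category-independent pass extracts the set of ALL known keywords occurring in the lowered request, then the category (unknown -> 'content') picks its priority-ordered keyword groups, the first group intersecting the hit set gives an index, and the answer is a dict lookup keyed by (category, index); A interleaves per-category substring tests in nested if/elif chains.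
import Mathlib
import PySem

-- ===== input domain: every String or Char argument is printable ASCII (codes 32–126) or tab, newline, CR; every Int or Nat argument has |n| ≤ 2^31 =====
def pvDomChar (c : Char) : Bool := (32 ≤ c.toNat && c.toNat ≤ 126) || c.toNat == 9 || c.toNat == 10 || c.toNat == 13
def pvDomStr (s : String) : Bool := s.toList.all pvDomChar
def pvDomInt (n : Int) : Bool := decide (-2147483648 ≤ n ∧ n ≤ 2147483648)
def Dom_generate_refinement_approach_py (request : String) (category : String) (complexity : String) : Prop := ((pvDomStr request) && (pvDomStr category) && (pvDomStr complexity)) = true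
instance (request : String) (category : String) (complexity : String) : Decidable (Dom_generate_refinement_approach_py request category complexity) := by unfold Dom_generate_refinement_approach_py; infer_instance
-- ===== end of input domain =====

-- ===== PORT A =====
-- One honest line: B is a two-stage pipeline (extract the set of all known keywords occurring in
-- the request, then resolve (category, first hit-intersecting group index) through a message table)
-- instead of A's nested per-category if/elif substring chains; objective: alternative.
def generate_refinement_approach_py (request : String) (category : String) (complexity : String) : String :=
  let request_lower := PySem.Str.lower request
  if category == "style" then
    if ["color", "theme"].any (fun w => PySem.Str.isIn w request_lower) then
      "Update color scheme and theme variables"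
    else if ["compact", "smaller", "size"].any (fun w => PySem.Str.isIn w request_lower) then
      "Reduce component size and spacing"
    else if PySem.Str.isIn "responsive" request_lower then
      "Add responsive breakpoints and mobile-first design"
    else
      "Apply visual style improvements"
  else if category == "functionality" then
    if ["click", "button", "action"].any (fun w => PySem.Str.isIn w request_lower) then
      "Add click handlers and interactive behavior"
    else if ["loading", "state"].any (fun w => PySem.Str.isIn w request_lower) then
      "Implement loading states and state management"
    else if PySem.Str.isIn "validation" request_lower then
      "Add form validation and error handling"
    else
      "Enhance component functionality"
  else if category == "structure" then
    if ["split", "separate"].any (fun w => PySem.Str.isIn w request_lower) then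
      "Break component into smaller, reusable parts"
    else if ["props", "customizable"].any (fun w => PySem.Str.isIn w request_lower) then
      "Add configurable props and options"
    else
      "Restructure component organization"
  else
    if PySem.Str.isIn "example" request_lower then
      "Update with more realistic example data"
    else if PySem.Str.isIn "placeholder" request_lower then
      "Improve placeholder content and messaging"
    else
      "Update component content and text"

-- ===== PORT B =====
def pvKeywordGroups : PySem.Dict String (List (List String)) :=
  PySem.Dict.ofList
    [ ("style", [["color", "theme"], ["compact", "smaller", "size"], ["responsive"]]),
      ("functionality", [["click", "button", "action"], ["loading", "state"], ["validation"]]),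
      ("structure", [["split", "separate"], ["props", "customizable"]]),
      ("content", [["example"], ["placeholder"]]) ]

def pvMessages : PySem.Dict (String × Int) String :=
  PySem.Dict.ofList
    [ (("style", 0), "Update color scheme and theme variables"),
      (("style", 1), "Reduce component size and spacing"),
      (("style", 2), "Add responsive breakpoints and mobile-first design"),
      (("style", 3), "Apply visual style improvements"),
      (("functionality", 0), "Add click handlers and interactive behavior"),
      (("functionality", 1), "Implement loading states and state management"),
      (("functionality", 2), "Add form validation and error handling"),
      (("functionality", 3), "Enhance component functionality"),
      (("structure", 0), "Break component into smaller, reusable parts"),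
      (("structure", 1), "Add configurable props and options"),
      (("structure", 2), "Restructure component organization"),
      (("content", 0), "Update with more realistic example data"),
      (("content", 1), "Improve placeholder content and messaging"),
      (("content", 2), "Update component content and text") ]

-- ALL_KEYWORDS = [w for groups in KEYWORD_GROUPS.values() for g in groups for w in g]
def pvAllKeywords : List String :=
  (pvKeywordGroups.values.flatMap (fun groups => groups)).flatMap (fun g => g)

-- next((i for i, g in enumerate(groups) if hits.intersection(g)), len(groups)), accumulator form
def pvFirstIdx (hits : PySem.Set String) : List (List String) → Int → Int
  | [], i => i
  | g :: rest, i =>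
    if PySem.Set.inter hits g ≠ [] then i else pvFirstIdx hits rest (i + 1)

def generate_refinement_approach_py_alt (request : String) (category : String) (complexity : String) : String :=
  let request_lower := PySem.Str.lower request
  let hits : PySem.Set String :=
    PySem.Set.ofList (pvAllKeywords.filter (fun w => PySem.Str.isIn w request_lower))
  let cat := if PySem.Dict.contains pvKeywordGroups category then category else "content"
  let groups := PySem.Dict.getD pvKeywordGroups cat []
  let idx := pvFirstIdx hits groups 0
  -- MESSAGES[cat, idx]: the key is always present by construction (idx ≤ len(groups)), so getD is exact
  PySem.Dict.getD pvMessages (cat, idx) ""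

-- ===== PRECONDITION & SPEC =====
def Spec_generate_refinement_approach_py (request : String) (category : String) (complexity : String) (out : String) : Prop := out = generate_refinement_approach_py_alt request category complexity
instance (request : String) (category : String) (complexity : String) (out : String) : Decidable (Spec_generate_refinement_approach_py request category complexity out) := by unfold Spec_generate_refinement_approach_py; infer_instance

-- ===== CLAIM (what is proved, stated in full; the proofs are below) =====
def Claim_equal_generate_refinement_approach_py : Prop := ∀ (request : String) (category : String) (complexity : String), Dom_generate_refinement_approach_py request category complexity → Spec_generate_refinement_approach_py request category complexity (generate_refinement_approach_py request category complexity)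

-- ===== LEMMAS AND PROOFS =====

-- the hit set intersects a group of known keywords iff some keyword of the group occurs in the request
theorem pv_inter_hits (rl : String) (g : List String) (hg : ∀ w ∈ g, w ∈ pvAllKeywords) :
    (PySem.Set.inter (PySem.Set.ofList (pvAllKeywords.filter (fun w => PySem.Str.isIn w rl))) g ≠ [])
      ↔ (g.any (fun w => PySem.Str.isIn w rl) = true) := by
  constructor
  · intro h
    rcases List.exists_mem_of_ne_nil _ h with ⟨x, hx⟩
    rw [PySem.Set.mem_inter] at hx
    have hx1 := hx.1
    rw [PySem.Set.mem_ofList, List.mem_filter] at hx1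
    exact List.any_eq_true.mpr ⟨x, hx.2, hx1.2⟩
  · intro h
    rcases List.any_eq_true.mp h with ⟨x, hxg, hxin⟩
    have hmem : x ∈ PySem.Set.inter (PySem.Set.ofList (pvAllKeywords.filter (fun w => PySem.Str.isIn w rl))) g := by
      rw [PySem.Set.mem_inter, PySem.Set.mem_ofList, List.mem_filter]
      exact ⟨⟨hg x hxg, hxin⟩, hxg⟩
    exact List.ne_nil_of_mem hmem

theorem pv_contains_other (c : String) (h1 : c ≠ "style") (h2 : c ≠ "functionality")
    (h3 : c ≠ "structure") (h4 : c ≠ "content") :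
    PySem.Dict.contains pvKeywordGroups c = false := by
  rw [PySem.Dict.contains_eq_decide_mem_keys]
  have hk : pvKeywordGroups.keys = ["style", "functionality", "structure", "content"] := by decide
  simp [hk, h1, h2, h3, h4]

-- ===== VERDICT (by name: the statement is the Claim_ definition above) =====
theorem generate_refinement_approach_py_spec : Claim_equal_generate_refinement_approach_py := by
  intro request category complexity _
  unfold Spec_generate_refinement_approach_py
  unfold generate_refinement_approach_py generate_refinement_approach_py_alt
  set rl := PySem.Str.lower request with hrl
  set hits := PySem.Set.ofList (pvAllKeywords.filter (fun w => PySem.Str.isIn w rl)) with hhits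
  have hi := fun g hg => pv_inter_hits rl g hg
  by_cases h1 : category = "style"
  · subst h1
    have hc : PySem.Dict.contains pvKeywordGroups "style" = true := by decide
    have hg : PySem.Dict.getD pvKeywordGroups "style" [] =
        [["color", "theme"], ["compact", "smaller", "size"], ["responsive"]] := by decide
    simp only [hc, if_true, hg, pvFirstIdx,
      hi [("color" : String), "theme"] (by decide),
      hi [("compact" : String), "smaller", "size"] (by decide),
      hi [("responsive" : String)] (by decide)]
    by_cases c1 : (["color", "theme"].any (fun w => PySem.Str.isIn w rl) = true) <;>
      by_cases c2 : (["compact", "smaller", "size"].any (fun w => PySem.Str.isIn w rl) = true) <;>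
      by_cases c3 : (["responsive"].any (fun w => PySem.Str.isIn w rl) = true) <;>
      simp_all [List.any_cons, List.any_nil] <;> decide
  · by_cases h2 : category = "functionality"
    · subst h2
      have hc : PySem.Dict.contains pvKeywordGroups "functionality" = true := by decide
      have hg : PySem.Dict.getD pvKeywordGroups "functionality" [] =
          [["click", "button", "action"], ["loading", "state"], ["validation"]] := by decide
      simp only [hc, if_true, hg, pvFirstIdx,
        hi [("click" : String), "button", "action"] (by decide),
        hi [("loading" : String), "state"] (by decide),
        hi [("validation" : String)] (by decide)]
      by_cases c1 : (["click", "button", "action"].any (fun w => PySem.Str.isIn w rl) = true) <;>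
        by_cases c2 : (["loading", "state"].any (fun w => PySem.Str.isIn w rl) = true) <;>
        by_cases c3 : (["validation"].any (fun w => PySem.Str.isIn w rl) = true) <;>
        simp_all [List.any_cons, List.any_nil] <;> decide
    · by_cases h3 : category = "structure"
      · subst h3
        have hc : PySem.Dict.contains pvKeywordGroups "structure" = true := by decide
        have hg : PySem.Dict.getD pvKeywordGroups "structure" [] =
            [["split", "separate"], ["props", "customizable"]] := by decide
        simp only [hc, if_true, hg, pvFirstIdx,
          hi [("split" : String), "separate"] (by decide),
          hi [("props" : String), "customizable"] (by decide)]
        by_cases c1 : (["split", "separate"].any (fun w => PySem.Str.isIn w rl) = true) <;>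
          by_cases c2 : (["props", "customizable"].any (fun w => PySem.Str.isIn w rl) = true) <;>
          simp_all [List.any_cons, List.any_nil] <;> decide
      · have hcontent : (if PySem.Dict.contains pvKeywordGroups category then category else "content") = "content" := by
          by_cases h4 : category = "content"
          · simp [h4]
          · rw [pv_contains_other category h1 h2 h3 h4]; simp
        have hg : PySem.Dict.getD pvKeywordGroups "content" [] = [["example"], ["placeholder"]] := by decide
        simp only [hcontent, hg, pvFirstIdx,
          hi [("example" : String)] (by decide),
          hi [("placeholder" : String)] (by decide)]
        have hb1 : (category == "style") = false := by simp [h1]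
        have hb2 : (category == "functionality") = false := by simp [h2]
        have hb3 : (category == "structure") = false := by simp [h3]
        simp only [hb1, hb2, hb3, Bool.false_eq_true, if_false]
        by_cases c1 : (["example"].any (fun w => PySem.Str.isIn w rl) = true) <;>
          by_cases c2 : (["placeholder"].any (fun w => PySem.Str.isIn w rl) = true) <;>
          simp_all [List.any_cons, List.any_nil] <;> decide
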